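-- pv_equiv track=rewrite | github.com/MeMAD-project/media-memorability | PicSOM_prediction/aalto-predict-2021.py | solve_max
-- ===== SOURCE A (Python) =====
-- def solve_max(r):
--     r_max = [ 0,  0]
--     e_max = [-1, -1]
--
--     for t, r0, r1 in r:
--         if r0>r_max[0]:
--             r_max[0] = r0
--             e_max[0] = t
--
--         if r1>r_max[1]:
--             r_max[1] = r1
--             e_max[1] = t
--
--     return r_max[0], e_max[0], r_max[1], e_max[1]
-- ===== SOURCE B (Python) =====
-- def solve_max(r):
--     rows = list(r)
--     if not rows:
--         return 0, -1, 0, -1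
--     b0 = max(rows, key=lambda x: x[1])
--     m0, t0 = (b0[1], b0[0]) if b0[1] > 0 else (0, -1)
--     b1 = max(rows, key=lambda x: x[2])
--     m1, t1 = (b1[2], b1[0]) if b1[2] > 0 else (0, -1)
--     return m0, t0, m1, t1
-- ===== Notes on version B (the rewrite author's own statement) =====
-- stated objective: idiomatic
-- what changed: Replaces the single combined loop with mutable per-column state by two independent max-by-key scans (Python's max with a key), each followed by a post-hoc positivity reset to (0,-1); the empty input is handled by an explicit early return.
import Mathlib
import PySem

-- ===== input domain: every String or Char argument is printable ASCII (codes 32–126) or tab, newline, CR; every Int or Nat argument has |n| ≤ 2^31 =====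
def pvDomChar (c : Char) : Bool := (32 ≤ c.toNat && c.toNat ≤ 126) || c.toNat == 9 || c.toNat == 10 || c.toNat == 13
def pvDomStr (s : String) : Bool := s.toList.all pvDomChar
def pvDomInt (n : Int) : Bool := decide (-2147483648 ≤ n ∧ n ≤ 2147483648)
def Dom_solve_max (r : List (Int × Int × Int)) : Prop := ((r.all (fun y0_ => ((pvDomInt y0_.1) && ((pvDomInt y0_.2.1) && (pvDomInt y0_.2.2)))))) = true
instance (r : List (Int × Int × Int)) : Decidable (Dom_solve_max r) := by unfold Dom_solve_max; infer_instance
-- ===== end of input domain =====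

-- B replaces A's single combined loop by two independent max-by-key scans with a
-- post-hoc positivity reset (more idiomatic decomposition; same O(n) cost).


-- ===== PORT A =====
-- A's loop: state ((r_max[0], r_max[1]), (e_max[0], e_max[1])), two sequential
-- strict-> updates per row, exactly as in the Python.
def solveMaxStep (s : (Int × Int) × (Int × Int)) (c : Int × Int × Int) :
    (Int × Int) × (Int × Int) :=
  let s1 := if c.2.1 > s.1.1 then ((c.2.1, s.1.2), (c.1, s.2.2)) else s
  if c.2.2 > s1.1.2 then ((s1.1.1, c.2.2), (s1.2.1, c.1)) else s1

def solve_max (r : List (Int × Int × Int)) : Int × Int × Int × Int :=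
  let st := r.foldl solveMaxStep ((0, 0), (-1, -1))
  (st.1.1, st.2.1, st.1.2, st.2.2)

-- ===== PORT B =====
-- Python's max(key=f): first element with maximal key (strict > keeps the earlier one).
def pyMaxBy (f : Int × Int × Int → Int) (x : Int × Int × Int)
    (xs : List (Int × Int × Int)) : Int × Int × Int :=
  xs.foldl (fun best c => if f c > f best then c else best) x

def solve_max_alt (r : List (Int × Int × Int)) : Int × Int × Int × Int :=
  match r with
  | [] => (0, -1, 0, -1)
  | x :: xs =>
    let b0 := pyMaxBy (fun p => p.2.1) x xs
    let p0 : Int × Int := if b0.2.1 > 0 then (b0.2.1, b0.1) else (0, -1)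
    let b1 := pyMaxBy (fun p => p.2.2) x xs
    let p1 : Int × Int := if b1.2.2 > 0 then (b1.2.2, b1.1) else (0, -1)
    (p0.1, p0.2, p1.1, p1.2)

-- ===== PRECONDITION & SPEC =====
def Spec_solve_max (r : List (Int × Int × Int)) (out : Int × Int × Int × Int) : Prop := out = solve_max_alt r
instance (r : List (Int × Int × Int)) (out : Int × Int × Int × Int) : Decidable (Spec_solve_max r out) := by unfold Spec_solve_max; infer_instance

-- ===== CLAIM (what is proved, stated in full; the proofs are below) =====
def Claim_equal_solve_max : Prop := ∀ (r : List (Int × Int × Int)), Dom_solve_max r → Spec_solve_max r (solve_max r)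

-- ===== LEMMAS AND PROOFS =====

-- A's loop restricted to one column.
def colStep (f : Int × Int × Int → Int) (s : Int × Int) (c : Int × Int × Int) : Int × Int :=
  if f c > s.1 then (f c, c.1) else s

def colFold (f : Int × Int × Int → Int) (s : Int × Int) (xs : List (Int × Int × Int)) : Int × Int :=
  xs.foldl (colStep f) s

-- A's combined fold is the pair of the two column folds.
theorem fold_split (xs : List (Int × Int × Int)) :
    ∀ m0 m1 e0 e1,
      xs.foldl solveMaxStep ((m0, m1), (e0, e1)) =
        (((colFold (fun p => p.2.1) (m0, e0) xs).1,
          (colFold (fun p => p.2.2) (m1, e1) xs).1),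
         ((colFold (fun p => p.2.1) (m0, e0) xs).2,
          (colFold (fun p => p.2.2) (m1, e1) xs).2)) := by
  induction xs with
  | nil => intro m0 m1 e0 e1; rfl
  | cons c xs ih =>
    intro m0 m1 e0 e1
    simp only [List.foldl_cons, colFold]
    rw [show solveMaxStep ((m0, m1), (e0, e1)) c =
        (((colStep (fun p => p.2.1) (m0, e0) c).1,
          (colStep (fun p => p.2.2) (m1, e1) c).1),
          ((colStep (fun p => p.2.1) (m0, e0) c).2,
          (colStep (fun p => p.2.2) (m1, e1) c).2)) from by
      simp only [solveMaxStep, colStep]; split_ifs <;> rfl]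
    exact ih _ _ _ _

-- Invariant linking A's column state with B's running max-by-key candidate.
def ColInv (f : Int × Int × Int → Int) (s : Int × Int) (b : Int × Int × Int) : Prop :=
  (f b > 0 ∧ s = (f b, b.1)) ∨ (f b ≤ 0 ∧ s = (0, -1))

theorem inv_preserved (f : Int × Int × Int → Int) (xs : List (Int × Int × Int)) :
    ∀ s b, ColInv f s b → ColInv f (colFold f s xs) (pyMaxBy f b xs) := by
  induction xs with
  | nil => intro s b h; exact h
  | cons c xs ih =>
    intro s b h
    simp only [colFold, pyMaxBy, List.foldl_cons]
    apply ih
    rcases h with ⟨hpos, hs⟩ | ⟨hnp, hs⟩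
    · subst hs
      simp only [ColInv, colStep]
      split_ifs with h1
      · exact Or.inl ⟨by omega, rfl⟩
      · exact Or.inl ⟨hpos, rfl⟩
    · subst hs
      simp only [ColInv, colStep]
      split_ifs with h1 h2 h2
      · exact Or.inl ⟨h2, rfl⟩
      · exact Or.inr ⟨by omega, rfl⟩
      · exact absurd h2 (by omega)
      · exact Or.inr ⟨hnp, rfl⟩

-- ===== VERDICT (by name: the statement is the Claim_ definition above) =====
theorem solve_max_spec : Claim_equal_solve_max := by
  intro r _
  unfold Spec_solve_max
  cases r with
  | nil => rfl
  | cons x xs =>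
    have h0 := inv_preserved (fun p => p.2.1) xs (colStep (fun p => p.2.1) (0, -1) x) x
      (by simp only [ColInv, colStep]; split_ifs with h <;> [exact Or.inl ⟨by omega, rfl⟩; exact Or.inr ⟨by omega, rfl⟩])
    have h1 := inv_preserved (fun p => p.2.2) xs (colStep (fun p => p.2.2) (0, -1) x) x
      (by simp only [ColInv, colStep]; split_ifs with h <;> [exact Or.inl ⟨by omega, rfl⟩; exact Or.inr ⟨by omega, rfl⟩])
    simp only [solve_max, solve_max_alt, List.foldl_cons]
    rw [show solveMaxStep ((0,0),(-1,-1)) x =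
        (((colStep (fun p => p.2.1) (0, -1) x).1,
          (colStep (fun p => p.2.2) (0, -1) x).1),
          ((colStep (fun p => p.2.1) (0, -1) x).2,
          (colStep (fun p => p.2.2) (0, -1) x).2)) from by
      simp only [solveMaxStep, colStep]; split_ifs <;> rfl]
    rw [fold_split]
    simp only [colFold, Prod.mk.eta]
    rcases h0 with ⟨p0, e0⟩ | ⟨p0, e0⟩ <;> rcases h1 with ⟨p1, e1⟩ | ⟨p1, e1⟩ <;>
      simp only [colFold] at e0 e1 <;> simp only at p0 p1 e0 e1 <;>
      rw [e0, e1] <;> split_ifs <;> first | rfl | omega
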